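-- pv_equiv track=rewrite | github.com/jso8910/advent_of_code_2022 | 2015/day_21/program.py | part_one
-- ===== SOURCE A (Python) =====
-- from itertools import product
--
-- WEAPONS = [
--     # Cost, damage, armor
--     [8, 4, 0],
--     [10, 5, 0],
--     [25, 6, 0],
--     [40, 7, 0],
--     [74, 8, 0],
-- ]
--
-- ARMOR = [
--     # Cost, damage, armor
--     [0, 0, 0],  # For not buying anything
--     [13, 0, 1],
--     [31, 0, 2],
--     [53, 0, 3],
--     [75, 0, 4],
--     [102, 0, 5]
-- ]
--
-- RINGS = [
--     [0, 0, 0],  # For not buying anything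
--     [25, 1, 0],
--     [50, 2, 0],
--     [100, 3, 0],
--     [20, 0, 1],
--     [40, 0, 2],
--     [80, 0, 3]
-- ]
--
-- def simulate(boss_damage, boss_armor, boss_hp, damage, armor, hp):
--     while hp or boss_hp:
--         boss_hp -= damage - boss_armor if damage - boss_armor > 1 else 1
--         if boss_hp <= 0:
--             return True
--         hp -= boss_damage - armor if boss_damage - armor > 1 else 1
--         if hp <= 0:
--             return False
--
-- def part_one(stats):
--     hit_points = stats[0]
--     damage = stats[1]
--     armor = stats[2]
--     wins = []
--     for combination in product(WEAPONS, ARMOR, RINGS, RINGS):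
--         if combination[2] == combination[3] != [0, 0, 0]:
--             continue
--         cost = sum(map(lambda x: x[0], combination))
--         total_damage = sum(map(lambda x: x[1], combination))
--         total_armor = sum(map(lambda x: x[2], combination))
--         if simulate(damage, armor, hit_points, total_damage, total_armor, 100):
--             wins.append(cost)
--
--     return min(wins)
-- ===== SOURCE B (Python) =====
-- # B: closed-form combat (ceil-division turn counts, player attacks first) over
-- # an unordered ring-choice enumeration, instead of A's turn-by-turn simulation
-- # over ordered ring pairs.
--
-- WEAPONS = [
--     [8, 4, 0],
--     [10, 5, 0],
--     [25, 6, 0],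
--     [40, 7, 0],
--     [74, 8, 0],
-- ]
--
-- ARMOR = [
--     [0, 0, 0],
--     [13, 0, 1],
--     [31, 0, 2],
--     [53, 0, 3],
--     [75, 0, 4],
--     [102, 0, 5],
-- ]
--
-- RINGS = [
--     [25, 1, 0],
--     [50, 2, 0],
--     [100, 3, 0],
--     [20, 0, 1],
--     [40, 0, 2],
--     [80, 0, 3],
-- ]
--
--
-- def _ring_options():
--     # no ring, one ring, or two distinct rings (unordered)
--     opts = [(0, 0, 0)]
--     for i, r in enumerate(RINGS):
--         opts.append((r[0], r[1], r[2]))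
--         for s in RINGS[i + 1:]:
--             opts.append((r[0] + s[0], r[1] + s[1], r[2] + s[2]))
--     return opts
--
--
-- def part_one(stats):
--     boss_hp = stats[0]
--     boss_dmg = stats[1]
--     boss_armor = stats[2]
--     return min(
--         wc + ac + rc
--         for wc, wd, _ in WEAPONS
--         for ac, _, aa in ARMOR
--         for rc, rd, ra in _ring_options()
--         # player wins iff he needs no more turns to kill than the boss does
--         if -(-boss_hp // max(wd + rd - boss_armor, 1))
--            <= -(-100 // max(boss_dmg - (aa + ra), 1))
--     )
-- ===== Notes on version B (the rewrite author's own statement) =====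
-- stated objective: alternative
-- what changed: B replaces A's turn-by-turn combat simulation over all ordered ring pairs by a closed-form ceiling-division turn-count comparison (player attacks first) over an unordered ring-choice enumeration (no ring / one ring / two distinct rings).
import Mathlib
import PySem

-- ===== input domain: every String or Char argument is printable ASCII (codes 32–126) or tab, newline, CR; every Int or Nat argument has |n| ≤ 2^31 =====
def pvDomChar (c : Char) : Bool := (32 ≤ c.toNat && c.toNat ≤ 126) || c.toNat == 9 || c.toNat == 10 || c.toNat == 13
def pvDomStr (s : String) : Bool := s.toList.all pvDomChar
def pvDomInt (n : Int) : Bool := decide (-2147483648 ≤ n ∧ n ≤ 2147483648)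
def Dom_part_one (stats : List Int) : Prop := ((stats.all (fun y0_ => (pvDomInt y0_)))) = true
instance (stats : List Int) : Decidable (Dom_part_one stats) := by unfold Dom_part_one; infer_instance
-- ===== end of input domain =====

-- B replaces A's turn-by-turn combat simulation over ordered ring pairs by a
-- closed-form ceiling-division turn-count comparison over unordered ring choices.


-- ===== PORT A =====
def pvWEAPONS : List (Int × Int × Int) :=
  [(8, 4, 0), (10, 5, 0), (25, 6, 0), (40, 7, 0), (74, 8, 0)]

def pvARMOR : List (Int × Int × Int) :=
  [(0, 0, 0), (13, 0, 1), (31, 0, 2), (53, 0, 3), (75, 0, 4), (102, 0, 5)]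

def pvRINGS : List (Int × Int × Int) :=
  [(0, 0, 0), (25, 1, 0), (50, 2, 0), (100, 3, 0), (20, 0, 1), (40, 0, 2), (80, 0, 3)]

-- while loop of `simulate`; `none` = the Python falls off the loop returning None
def simulate (boss_damage boss_armor boss_hp damage armor hp : Int) : Option Bool :=
  if hp ≠ 0 ∨ boss_hp ≠ 0 then
    if _hb : boss_hp - (if damage - boss_armor > 1 then damage - boss_armor else 1) ≤ 0 then
      some true
    else if _hh : hp - (if boss_damage - armor > 1 then boss_damage - armor else 1) ≤ 0 then
      some false
    else
      simulate boss_damage boss_armor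
        (boss_hp - (if damage - boss_armor > 1 then damage - boss_armor else 1))
        damage armor
        (hp - (if boss_damage - armor > 1 then boss_damage - armor else 1))
  else none
termination_by boss_hp.toNat
decreasing_by split_ifs at * <;> omega

def part_one (stats : List Int) : Int :=
  let hit_points := (PySem.List.pyGet? stats 0).getD 0
  let damage := (PySem.List.pyGet? stats 1).getD 0
  let armor := (PySem.List.pyGet? stats 2).getD 0
  let combos := pvWEAPONS.flatMap fun w => pvARMOR.flatMap fun ar =>
    pvRINGS.flatMap fun r1 => pvRINGS.map fun r2 => (w, ar, r1, r2)
  let wins := combos.foldl (fun wins c =>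
      if c.2.2.1 = c.2.2.2 ∧ c.2.2.2 ≠ ((0 : Int), (0 : Int), (0 : Int)) then wins
      else
        let cost := c.1.1 + c.2.1.1 + c.2.2.1.1 + c.2.2.2.1
        let total_damage := c.1.2.1 + c.2.1.2.1 + c.2.2.1.2.1 + c.2.2.2.2.1
        let total_armor := c.1.2.2 + c.2.1.2.2 + c.2.2.1.2.2 + c.2.2.2.2.2
        if simulate damage armor hit_points total_damage total_armor 100 = some true
        then wins ++ [cost] else wins)
    []
  (PySem.List.min? wins (fun x => x)).getD 0   -- min([]): Python raises ValueError (excluded by Pre_)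

-- ===== PORT B =====
def pvRINGS_B : List (Int × Int × Int) :=
  [(25, 1, 0), (50, 2, 0), (100, 3, 0), (20, 0, 1), (40, 0, 2), (80, 0, 3)]

-- ceiling division -(-x // y)
def cdiv (x y : Int) : Int := -(PySem.Int.floordiv (-x) y)

-- _ring_options: no ring, one ring, or two distinct rings (unordered)
def ringOptionsAux : List (Int × Int × Int) → List (Int × Int × Int)
  | [] => []
  | r :: rest =>
      (r.1, r.2.1, r.2.2) ::
        (rest.map (fun s => (r.1 + s.1, r.2.1 + s.2.1, r.2.2 + s.2.2)) ++ ringOptionsAux rest)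

def ringOptions : List (Int × Int × Int) := (0, 0, 0) :: ringOptionsAux pvRINGS_B

def part_one_alt (stats : List Int) : Int :=
  let boss_hp := (PySem.List.pyGet? stats 0).getD 0
  let boss_dmg := (PySem.List.pyGet? stats 1).getD 0
  let boss_armor := (PySem.List.pyGet? stats 2).getD 0
  let wins := pvWEAPONS.flatMap fun w => pvARMOR.flatMap fun ar =>
    ringOptions.filterMap fun r =>
      if cdiv boss_hp (max (w.2.1 + r.2.1 - boss_armor) 1)
           ≤ cdiv 100 (max (boss_dmg - (ar.2.2 + r.2.2)) 1)
      then some (w.1 + ar.1 + r.1) else none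
  (PySem.List.min? wins (fun x => x)).getD 0   -- min of empty generator raises in Python (excluded by Pre_)

-- ===== PRECONDITION & SPEC =====
-- Pre_ excludes exactly the inputs where the Python A raises: stats shorter than 3
-- (IndexError) and boss stats no equipment combination can beat (min([]) raises ValueError).
def Pre_part_one (stats : List Int) : Prop :=
  3 ≤ stats.length ∧
  ∃ w ∈ pvWEAPONS, ∃ ar ∈ pvARMOR, ∃ r1 ∈ pvRINGS, ∃ r2 ∈ pvRINGS,
    ¬(r1 = r2 ∧ r2 ≠ ((0 : Int), (0 : Int), (0 : Int))) ∧
    cdiv (stats.getD 0 0) (max (w.2.1 + r1.2.1 + r2.2.1 - stats.getD 2 0) 1)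
      ≤ cdiv 100 (max (stats.getD 1 0 - (ar.2.2 + r1.2.2 + r2.2.2)) 1)

instance (stats : List Int) : Decidable (Pre_part_one stats) := by
  unfold Pre_part_one; infer_instance

def pvWitness_part_one : List Int := [8, 5, 0]

def Spec_part_one (stats : List Int) (out : Int) : Prop := out = part_one_alt stats
instance (stats : List Int) (out : Int) : Decidable (Spec_part_one stats out) := by
  unfold Spec_part_one; infer_instance

-- ===== CLAIM (what is proved, stated in full; the proofs are below) =====
def Claim_equal_part_one : Prop :=
  ∀ (stats : List Int), Dom_part_one stats → Pre_part_one stats →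
    Spec_part_one stats (part_one stats)

-- ===== LEMMAS AND PROOFS =====

-- ceiling-division brackets
theorem cdiv_le_iff {a b n : Int} (hb : 0 < b) : cdiv a b ≤ n ↔ a ≤ n * b := by
  unfold cdiv
  rw [neg_le, PySem.Int.le_floordiv_iff_mul_le hb, neg_mul, neg_le_neg_iff]

theorem cdiv_sub_same {a b : Int} (hb : 0 < b) : cdiv (a - b) b = cdiv a b - 1 := by
  unfold cdiv
  rw [PySem.Int.floordiv_eq_ediv_of_pos hb, PySem.Int.floordiv_eq_ediv_of_pos hb]
  rw [show -(a - b) = -a + 1 * b by ring, Int.add_mul_ediv_right _ _ (by omega : b ≠ 0)]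
  ring

-- closed form of A's combat loop: the side with at most as many ceil-division
-- turns to kill wins, the player attacking first
theorem simulate_closed (bd ba dmg ar : Int) :
    ∀ (n : Nat) (bhp hp : Int), bhp.toNat = n → 0 < hp →
      simulate bd ba bhp dmg ar hp =
        some (decide (cdiv bhp (max (dmg - ba) 1) ≤ cdiv hp (max (bd - ar) 1))) := by
  intro n
  induction n using Nat.strong_induction_on with
  | _ n ih =>
    intro bhp hp hn hhp
    rw [simulate, if_pos (Or.inl (by omega : hp ≠ 0))]
    have hP : (if dmg - ba > 1 then dmg - ba else 1 : Int) = max (dmg - ba) 1 := by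
      split <;> omega
    have hB : (if bd - ar > 1 then bd - ar else 1 : Int) = max (bd - ar) 1 := by
      split <;> omega
    simp only [hP, hB]
    have hP1 : (1 : Int) ≤ max (dmg - ba) 1 := le_max_right _ _
    have hB1 : (1 : Int) ≤ max (bd - ar) 1 := le_max_right _ _
    have hPpos : (0 : Int) < max (dmg - ba) 1 := by omega
    have hBpos : (0 : Int) < max (bd - ar) 1 := by omega
    split_ifs with h1 h2
    · -- boss dies this turn
      have l1 : cdiv bhp (max (dmg - ba) 1) ≤ 1 := (cdiv_le_iff hPpos).mpr (by omega)
      have l2 : ¬ cdiv hp (max (bd - ar) 1) ≤ 0 := by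
        intro hc
        have := (cdiv_le_iff hBpos).mp hc
        omega
      simp only [Option.some.injEq]
      symm
      rw [decide_eq_true_eq]
      omega
    · -- player dies this turn
      have l1 : cdiv hp (max (bd - ar) 1) ≤ 1 := (cdiv_le_iff hBpos).mpr (by omega)
      have l2 : ¬ cdiv bhp (max (dmg - ba) 1) ≤ 1 := by
        intro hc
        have := (cdiv_le_iff hPpos).mp hc
        omega
      simp only [Option.some.injEq]
      symm
      rw [decide_eq_false_iff_not]
      omega
    · -- both survive: one more round
      rw [ih (bhp - max (dmg - ba) 1).toNat (by omega) _ _ rfl (by omega)]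
      rw [cdiv_sub_same hPpos, cdiv_sub_same hBpos]
      exact congrArg some (decide_eq_decide.mpr (by omega))

-- A's wins list, as a function of the three boss stats
def winsA (H d a : Int) : List Int :=
  (pvWEAPONS.flatMap fun w => pvARMOR.flatMap fun ar =>
    pvRINGS.flatMap fun r1 => pvRINGS.map fun r2 => (w, ar, r1, r2)).foldl
    (fun wins c =>
      if c.2.2.1 = c.2.2.2 ∧ c.2.2.2 ≠ ((0 : Int), (0 : Int), (0 : Int)) then wins
      else
        let cost := c.1.1 + c.2.1.1 + c.2.2.1.1 + c.2.2.2.1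
        let total_damage := c.1.2.1 + c.2.1.2.1 + c.2.2.1.2.1 + c.2.2.2.2.1
        let total_armor := c.1.2.2 + c.2.1.2.2 + c.2.2.1.2.2 + c.2.2.2.2.2
        if simulate d a H total_damage total_armor 100 = some true
        then wins ++ [cost] else wins)
    []

-- B's wins list, as a function of the three boss stats
def winsB (H d a : Int) : List Int :=
  pvWEAPONS.flatMap fun w => pvARMOR.flatMap fun ar =>
    ringOptions.filterMap fun r =>
      if cdiv H (max (w.2.1 + r.2.1 - a) 1) ≤ cdiv 100 (max (d - (ar.2.2 + r.2.2)) 1)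
      then some (w.1 + ar.1 + r.1) else none

theorem part_one_eq (stats : List Int) :
    part_one stats =
      (PySem.List.min? (winsA ((PySem.List.pyGet? stats 0).getD 0)
        ((PySem.List.pyGet? stats 1).getD 0) ((PySem.List.pyGet? stats 2).getD 0))
        (fun x => x)).getD 0 := rfl

theorem part_one_alt_eq (stats : List Int) :
    part_one_alt stats =
      (PySem.List.min? (winsB ((PySem.List.pyGet? stats 0).getD 0)
        ((PySem.List.pyGet? stats 1).getD 0) ((PySem.List.pyGet? stats 2).getD 0))
        (fun x => x)).getD 0 := rfl

theorem mem_winsA (H d a x : Int) :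
    x ∈ winsA H d a ↔
      ∃ w ∈ pvWEAPONS, ∃ ar ∈ pvARMOR, ∃ r1 ∈ pvRINGS, ∃ r2 ∈ pvRINGS,
        ¬(r1 = r2 ∧ r2 ≠ ((0 : Int), (0 : Int), (0 : Int))) ∧
        simulate d a H (w.2.1 + ar.2.1 + r1.2.1 + r2.2.1)
          (w.2.2 + ar.2.2 + r1.2.2 + r2.2.2) 100 = some true ∧
        x = w.1 + ar.1 + r1.1 + r2.1 := by
  unfold winsA
  have hfun : (fun (wins : List Int)
        (c : (Int × Int × Int) × (Int × Int × Int) × (Int × Int × Int) × (Int × Int × Int)) =>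
      if c.2.2.1 = c.2.2.2 ∧ c.2.2.2 ≠ ((0 : Int), (0 : Int), (0 : Int)) then wins
      else
        let cost := c.1.1 + c.2.1.1 + c.2.2.1.1 + c.2.2.2.1
        let total_damage := c.1.2.1 + c.2.1.2.1 + c.2.2.1.2.1 + c.2.2.2.2.1
        let total_armor := c.1.2.2 + c.2.1.2.2 + c.2.2.1.2.2 + c.2.2.2.2.2
        if simulate d a H total_damage total_armor 100 = some true
        then wins ++ [cost] else wins) =
      (fun wins c =>
        if (!decide (c.2.2.1 = c.2.2.2 ∧ c.2.2.2 ≠ ((0 : Int), (0 : Int), (0 : Int))) &&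
            decide (simulate d a H (c.1.2.1 + c.2.1.2.1 + c.2.2.1.2.1 + c.2.2.2.2.1)
              (c.1.2.2 + c.2.1.2.2 + c.2.2.1.2.2 + c.2.2.2.2.2) 100 = some true))
        then wins ++ [c.1.1 + c.2.1.1 + c.2.2.1.1 + c.2.2.2.1] else wins) := by
    funext acc c
    by_cases h1 : c.2.2.1 = c.2.2.2 ∧ c.2.2.2 ≠ ((0 : Int), (0 : Int), (0 : Int)) <;>
      by_cases h2 : simulate d a H (c.1.2.1 + c.2.1.2.1 + c.2.2.1.2.1 + c.2.2.2.2.1)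
          (c.1.2.2 + c.2.1.2.2 + c.2.2.1.2.2 + c.2.2.2.2.2) 100 = some true <;>
      simp [h1, h2]
  rw [hfun]
  rw [PySem.List.foldl_append_if]
  simp only [List.nil_append, List.mem_map, List.mem_filter, List.mem_flatMap,
    Bool.and_eq_true, Bool.not_eq_true', decide_eq_false_iff_not, decide_eq_true_eq]
  constructor
  · rintro ⟨c, ⟨⟨w, hw, ar, har, r1, hr1, r2, hr2, rfl⟩, hskip, hsim⟩, rfl⟩
    exact ⟨w, hw, ar, har, r1, hr1, r2, hr2, hskip, hsim, rfl⟩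
  · rintro ⟨w, hw, ar, har, r1, hr1, r2, hr2, hskip, hsim, rfl⟩
    exact ⟨(w, ar, r1, r2), ⟨⟨w, hw, ar, har, r1, hr1, r2, hr2, rfl⟩, hskip, hsim⟩, rfl⟩

theorem mem_winsB (H d a x : Int) :
    x ∈ winsB H d a ↔
      ∃ w ∈ pvWEAPONS, ∃ ar ∈ pvARMOR, ∃ r ∈ ringOptions,
        cdiv H (max (w.2.1 + r.2.1 - a) 1) ≤ cdiv 100 (max (d - (ar.2.2 + r.2.2)) 1) ∧
        x = w.1 + ar.1 + r.1 := by
  unfold winsB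
  simp only [List.mem_flatMap, List.mem_filterMap]
  constructor
  · rintro ⟨w, hw, ar, har, r, hr, hopt⟩
    by_cases hc : cdiv H (max (w.2.1 + r.2.1 - a) 1) ≤ cdiv 100 (max (d - (ar.2.2 + r.2.2)) 1)
    · rw [if_pos hc, Option.some_inj] at hopt
      subst hopt
      exact ⟨w, hw, ar, har, r, hr, hc, rfl⟩
    · rw [if_neg hc] at hopt
      cases hopt
  · rintro ⟨w, hw, ar, har, r, hr, hc, rfl⟩
    exact ⟨w, hw, ar, har, r, hr, by rw [if_pos hc]⟩

-- the ordered non-duplicate ring pairs of A and the unordered ring options of B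
-- produce the same set of (cost, damage, armor) sums
def ringSumsA : List (Int × Int × Int) :=
  pvRINGS.flatMap fun r1 => pvRINGS.filterMap fun r2 =>
    if r1 = r2 ∧ r2 ≠ ((0 : Int), (0 : Int), (0 : Int)) then none
    else some (r1.1 + r2.1, r1.2.1 + r2.2.1, r1.2.2 + r2.2.2)

theorem ringSumsA_sub : ∀ t ∈ ringSumsA, t ∈ ringOptions := by decide
theorem ringOptions_sub : ∀ t ∈ ringOptions, t ∈ ringSumsA := by decide

theorem mem_ringSumsA (t : Int × Int × Int) :
    t ∈ ringSumsA ↔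
      ∃ r1 ∈ pvRINGS, ∃ r2 ∈ pvRINGS,
        ¬(r1 = r2 ∧ r2 ≠ ((0 : Int), (0 : Int), (0 : Int))) ∧
        t = (r1.1 + r2.1, r1.2.1 + r2.2.1, r1.2.2 + r2.2.2) := by
  unfold ringSumsA
  simp only [List.mem_flatMap, List.mem_filterMap]
  constructor
  · rintro ⟨r1, hr1, r2, hr2, hopt⟩
    by_cases hc : r1 = r2 ∧ r2 ≠ ((0 : Int), (0 : Int), (0 : Int))
    · rw [if_pos hc] at hopt
      cases hopt
    · rw [if_neg hc, Option.some_inj] at hopt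
      subst hopt
      exact ⟨r1, hr1, r2, hr2, hc, rfl⟩
  · rintro ⟨r1, hr1, r2, hr2, hc, rfl⟩
    exact ⟨r1, hr1, r2, hr2, by rw [if_neg hc]⟩

-- weapon and armor components A sums but the tables keep at zero
theorem weapons_armor_zero : ∀ w ∈ pvWEAPONS, w.2.2 = 0 := by decide
theorem armor_damage_zero : ∀ ar ∈ pvARMOR, ar.2.1 = 0 := by decide

theorem mem_winsA_iff_winsB (H d a x : Int) : x ∈ winsA H d a ↔ x ∈ winsB H d a := by
  rw [mem_winsA, mem_winsB]
  constructor
  · rintro ⟨w, hw, ar, har, r1, hr1, r2, hr2, hskip, hsim, rfl⟩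
    refine ⟨w, hw, ar, har, (r1.1 + r2.1, r1.2.1 + r2.2.1, r1.2.2 + r2.2.2),
      ringSumsA_sub _ ((mem_ringSumsA _).mpr ⟨r1, hr1, r2, hr2, hskip, rfl⟩), ?_, by ring⟩
    rw [simulate_closed _ _ _ _ _ _ _ rfl (by omega)] at hsim
    simp only [Option.some.injEq, decide_eq_true_eq] at hsim
    have hz1 := weapons_armor_zero w hw
    have hz2 := armor_damage_zero ar har
    convert hsim using 3 <;> simp <;> omega
  · rintro ⟨w, hw, ar, har, r, hr, hc, rfl⟩
    obtain ⟨r1, hr1, r2, hr2, hskip, rfl⟩ := (mem_ringSumsA r).mp (ringOptions_sub r hr)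
    refine ⟨w, hw, ar, har, r1, hr1, r2, hr2, hskip, ?_, by ring⟩
    rw [simulate_closed _ _ _ _ _ _ _ rfl (by omega)]
    simp only [Option.some.injEq, decide_eq_true_eq]
    have hz1 := weapons_armor_zero w hw
    have hz2 := armor_damage_zero ar har
    convert hc using 3 <;> simp <;> omega

-- min over Int lists with equal membership is equal
theorem min?_ext {l1 l2 : List Int} (h : ∀ x, x ∈ l1 ↔ x ∈ l2) :
    PySem.List.min? l1 (fun x => x) = PySem.List.min? l2 (fun x => x) := by
  cases h1 : PySem.List.min? l1 (fun x => x) with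
  | none =>
    cases h2 : PySem.List.min? l2 (fun x => x) with
    | none => rfl
    | some m2 =>
      have : m2 ∈ l1 := (h m2).mpr (PySem.List.min?_mem h2)
      rw [(PySem.List.min?_eq_none_iff l1 _).mp h1] at this
      cases this
  | some m1 =>
    cases h2 : PySem.List.min? l2 (fun x => x) with
    | none =>
      have : m1 ∈ l2 := (h m1).mp (PySem.List.min?_mem h1)
      rw [(PySem.List.min?_eq_none_iff l2 _).mp h2] at this
      cases this
    | some m2 =>
      have ha : m1 ≤ m2 := PySem.List.min?_isMin h1 m2 ((h m2).mpr (PySem.List.min?_mem h2))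
      have hb : m2 ≤ m1 := PySem.List.min?_isMin h2 m1 ((h m1).mp (PySem.List.min?_mem h1))
      exact congrArg some (le_antisymm ha hb)

-- ===== VERDICT (by name: the statement is the Claim_ definition above) =====
theorem part_one_spec : Claim_equal_part_one := by
  intro stats _ _
  unfold Spec_part_one
  rw [part_one_eq, part_one_alt_eq]
  exact congrArg (Option.getD · 0) (min?_ext (mem_winsA_iff_winsB _ _ _))
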